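-- pv_equiv track=rewrite | github.com/mary-bauman/ICPC2019 | C/C.py | checkConsecutiveRows
-- ===== SOURCE A (Python) =====
-- def checkConsecutiveRows(grid):
-- #Check for consecutive row
--     for i in range(len(grid)):
--         consecutive = 0
--         for j in range(len(grid[i]) - 1):
--             if grid[i][j] == grid[i][j + 1]:
--                 consecutive += 1
--             else:
--                 consecutive = 0
--             if consecutive > 1:
--                 return False
--     return True
-- ===== SOURCE B (Python) =====
-- from itertools import groupby
--
-- def checkConsecutiveRows(grid):
--     return not any(sum(1 for _ in g) >= 3
--                    for row in grid
--                    for _, g in groupby(row))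
-- ===== Notes on version B (the rewrite author's own statement) =====
-- stated objective: idiomatic
-- what changed: Replaces the index-based reset-on-mismatch running counter with itertools.groupby run-length grouping: collapse each row into runs of equal consecutive elements and return False iff some run has length >= 3.
import Mathlib
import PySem

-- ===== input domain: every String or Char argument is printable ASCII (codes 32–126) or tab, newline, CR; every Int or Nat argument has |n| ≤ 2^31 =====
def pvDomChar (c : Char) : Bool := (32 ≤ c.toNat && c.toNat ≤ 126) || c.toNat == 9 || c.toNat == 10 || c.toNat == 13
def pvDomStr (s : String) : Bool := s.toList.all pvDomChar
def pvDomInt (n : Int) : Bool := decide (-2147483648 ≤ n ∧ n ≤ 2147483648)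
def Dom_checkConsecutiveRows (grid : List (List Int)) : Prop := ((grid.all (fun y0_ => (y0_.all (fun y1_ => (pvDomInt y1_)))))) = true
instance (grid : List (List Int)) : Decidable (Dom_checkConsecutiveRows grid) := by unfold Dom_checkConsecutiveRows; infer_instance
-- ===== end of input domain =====

-- B replaces A's index-based reset-on-mismatch counter with run-length grouping
-- (itertools.groupby): a row is bad iff some run of equal consecutive elements
-- has length >= 3 (objective: idiomatic; same cost).


-- ===== PORT A =====
-- inner loop: `for j in range(len(grid[i]) - 1)` with the running `consecutive`
-- counter and the early `return False`; `row[j]!` is always in range here.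
def aRowLoop (row : List Int) (j : Nat) (consecutive : Int) : Bool :=
  if h : j + 1 < row.length then
    let consecutive := if row[j]! = row[j + 1]! then consecutive + 1 else 0
    if consecutive > 1 then true
    else aRowLoop row (j + 1) consecutive
  else false
termination_by row.length - j

-- outer loop: rows in order, early return False when the inner loop returned
def checkConsecutiveRows (grid : List (List Int)) : Bool :=
  match grid with
  | [] => true
  | row :: rest => if aRowLoop row 0 0 then false else checkConsecutiveRows rest

-- ===== PORT B =====
-- groupby: consume the current run (value v, count n so far), emit (v, n) when
-- the value changes or the row ends
def goRun (v : Int) (n : Nat) : List Int → List (Int × Nat)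
  | [] => [(v, n)]
  | y :: ys => if y = v then goRun v (n + 1) ys else (v, n) :: goRun y 1 ys

def runLengths (row : List Int) : List (Int × Nat) :=
  match row with
  | [] => []
  | x :: xs => goRun x 1 xs

def checkConsecutiveRows_alt (grid : List (List Int)) : Bool :=
  !(grid.any (fun row => (runLengths row).any (fun p => 3 ≤ p.2)))

-- ===== PRECONDITION & SPEC =====
def Spec_checkConsecutiveRows (grid : List (List Int)) (out : Bool) : Prop := out = checkConsecutiveRows_alt grid
instance (grid : List (List Int)) (out : Bool) : Decidable (Spec_checkConsecutiveRows grid out) := by unfold Spec_checkConsecutiveRows; infer_instance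

-- ===== CLAIM (what is proved, stated in full; the proofs are below) =====
def Claim_equal_checkConsecutiveRows : Prop := ∀ (grid : List (List Int)), Dom_checkConsecutiveRows grid → Spec_checkConsecutiveRows grid (checkConsecutiveRows grid)

-- ===== LEMMAS AND PROOFS =====

-- reference form of A's inner loop, structural on the suffix of the row
def go : List Int → Int → Bool
  | a :: b :: t, c =>
      let c' := if a = b then c + 1 else 0
      if c' > 1 then true else go (b :: t) c'
  | _, _ => false

theorem go_nil (c : Int) : go [] c = false := rfl
theorem go_one (a c : Int) : go [a] c = false := rfl
theorem go_cons (a b : Int) (t : List Int) (c : Int) :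
    go (a :: b :: t) c =
      (if (if a = b then c + 1 else 0) > 1 then true
       else go (b :: t) (if a = b then c + 1 else 0)) := rfl

theorem drop_two (row : List Int) (j : Nat) (h : j + 1 < row.length) :
    row.drop j = row[j]! :: row[j+1]! :: row.drop (j + 2) := by
  have h1 : j < row.length := by omega
  rw [getElem!_pos row j h1, getElem!_pos row (j+1) h]
  rw [List.drop_eq_getElem_cons h1]
  congr 1
  rw [List.drop_eq_getElem_cons (by simpa using h)]

theorem drop_one (row : List Int) (j : Nat) (h : j + 1 < row.length) :
    row.drop (j + 1) = row[j+1]! :: row.drop (j + 2) := by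
  rw [getElem!_pos row (j+1) h, List.drop_eq_getElem_cons (by simpa using h)]

theorem aRowLoop_eq_go_fuel (k : Nat) : ∀ (row : List Int) (j : Nat) (c : Int),
    row.length - j ≤ k → aRowLoop row j c = go (row.drop j) c := by
  induction k with
  | zero =>
      intro row j c hk
      have h : ¬ (j + 1 < row.length) := by omega
      rw [aRowLoop, dif_neg h]
      have hnil : row.drop j = [] := List.drop_eq_nil_of_le (by omega)
      rw [hnil, go_nil]
  | succ k ih =>
      intro row j c hk
      by_cases h : j + 1 < row.length
      · rw [aRowLoop, dif_pos h, drop_two row j h, go_cons]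
        by_cases hgt : (if row[j]! = row[j+1]! then c + 1 else 0) > 1
        · rw [if_pos hgt, if_pos hgt]
        · rw [if_neg hgt, if_neg hgt]
          rw [ih row (j + 1) _ (by omega), drop_one row j h]
      · rw [aRowLoop, dif_neg h]
        match hx : row.drop j with
        | [] => rw [go_nil]
        | [a] => rw [go_one]
        | a :: b :: t =>
            exfalso
            have := List.length_drop (l := row) (i := j)
            rw [hx] at this
            simp at this
            omega

theorem aRowLoop_eq_go (row : List Int) (j : Nat) (c : Int) :
    aRowLoop row j c = go (row.drop j) c :=
  aRowLoop_eq_go_fuel (row.length - j) row j c (le_refl _)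

theorem goRun_big (v : Int) (n : Nat) (hn : 3 ≤ n) (ys : List Int) :
    (goRun v n ys).any (fun p => 3 ≤ p.2) = true := by
  induction ys generalizing v n with
  | nil => simp [goRun, hn]
  | cons y ys ih =>
      rw [goRun]
      by_cases he : y = v
      · rw [if_pos he]; exact ih v (n + 1) (by omega)
      · simp [if_neg he, hn]

theorem goRun_eq_go (ys : List Int) : ∀ (v : Int) (n : Nat), 1 ≤ n → n ≤ 2 →
    (goRun v n ys).any (fun p => 3 ≤ p.2) = go (v :: ys) ((n : Int) - 1) := by
  induction ys with
  | nil =>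
      intro v n _ h2
      rw [goRun, go_one]
      simp
      omega
  | cons y ys ih =>
      intro v n h1 h2
      rw [goRun, go_cons]
      by_cases he : y = v
      · rw [if_pos he, if_pos he.symm]
        by_cases hn2 : n = 2
        · subst hn2
          rw [if_pos (show ((2:Nat) : Int) - 1 + 1 > 1 by norm_num)]
          exact goRun_big v 3 (by omega) ys
        · have hn1 : n = 1 := by omega
          subst hn1
          rw [if_neg (show ¬ (((1:Nat) : Int) - 1 + 1 > 1) by norm_num)]
          rw [show ((1:Nat) : Int) - 1 + 1 = ((2:Nat) : Int) - 1 by norm_num]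
          rw [← he]
          exact ih y 2 (by omega) (by omega)
      · rw [if_neg he, if_neg (show ¬ v = y from fun hx => he hx.symm)]
        rw [if_neg (show ¬ ((0:Int) > 1) by omega)]
        simp only [List.any_cons]
        rw [show decide (3 ≤ n) = false by simp; omega, Bool.false_or]
        have hih := ih y 1 (le_refl 1) (by omega)
        rw [hih]
        norm_num

theorem row_eq (row : List Int) :
    aRowLoop row 0 0 = (runLengths row).any (fun p => 3 ≤ p.2) := by
  rw [aRowLoop_eq_go, List.drop_zero]
  match row with
  | [] => rfl
  | x :: xs =>
      rw [runLengths, goRun_eq_go xs x 1 (by omega) (by omega)]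
      norm_num

theorem check_eq (grid : List (List Int)) :
    checkConsecutiveRows grid = checkConsecutiveRows_alt grid := by
  induction grid with
  | nil => rfl
  | cons row rest ih =>
      rw [checkConsecutiveRows, row_eq]
      unfold checkConsecutiveRows_alt
      rw [List.any_cons]
      by_cases h : (runLengths row).any (fun p => 3 ≤ p.2) = true
      · simp [h]
      · simp only [Bool.not_eq_true] at h
        simp only [h, Bool.false_or, Bool.false_eq_true, if_false]
        exact ih

-- ===== VERDICT (by name: the statement is the Claim_ definition above) =====
theorem checkConsecutiveRows_spec : Claim_equal_checkConsecutiveRows := by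
  intro grid _
  unfold Spec_checkConsecutiveRows
  exact check_eq grid
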